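-- pv_equiv track=rewrite | github.com/shivamr021/DSA | Coding Ninjas/Terms Of AP.py | termsOfAP
-- ===== SOURCE A (Python) =====
-- def termsOfAP(x):
--
--     # Write your code here
--     # Return a list of integers
--     res = []
--     n = 1
--     while len(res) < x:
--         term = 3 * n + 2
--         if term % 4 != 0:
--             res.append(term)
--         n += 1
--     return res
-- ===== SOURCE B (Python) =====
-- def termsOfAP(x):
--     # 3n+2 is divisible by 4 exactly when n % 4 == 2, so each block of 4
--     # consecutive n keeps the 3 values 4b+1, 4b+3, 4b+4: compute the i-th
--     # kept term directly, no filtering loop.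
--     return [3 * (4 * (i // 3) + (1, 3, 4)[i % 3]) + 2 for i in range(x)]
-- ===== Notes on version B (the rewrite author's own statement) =====
-- stated objective: faster
-- what changed: Replaces the filtering while-loop (generate successive terms of the progression and drop every fourth one until enough are collected) by closed-form indexing of the kept terms, built in one comprehension with no divisibility test and a quarter fewer iterations.
import Mathlib
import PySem

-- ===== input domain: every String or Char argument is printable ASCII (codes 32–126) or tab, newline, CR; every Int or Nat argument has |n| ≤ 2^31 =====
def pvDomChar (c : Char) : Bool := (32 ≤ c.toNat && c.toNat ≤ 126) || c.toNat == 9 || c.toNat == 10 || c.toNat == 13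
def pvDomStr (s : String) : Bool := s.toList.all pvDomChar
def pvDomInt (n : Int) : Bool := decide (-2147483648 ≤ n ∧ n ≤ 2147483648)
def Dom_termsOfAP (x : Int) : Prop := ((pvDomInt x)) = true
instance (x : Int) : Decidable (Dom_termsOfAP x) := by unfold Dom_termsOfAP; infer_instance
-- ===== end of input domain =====

-- B replaces A's divisibility-filtering while-loop by closed-form indexing of the kept terms (alternative decomposition; return values are identical).

-- ===== PORT A =====
-- A's while-loop: append 3n+2 when not divisible by 4, until res has x elements.
-- The Nat fuel is only a totality guard (structural recursion): every iteration with
-- res.length < x loses at least one fuel, and 2*x.toNat+2 is proved sufficient below,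
-- so the loop always exits via the len(res) < x test exactly as the Python while does.
def termsOfAPLoop (fuel : Nat) (x : Int) (res : List Int) (n : Int) : List Int :=
  match fuel with
  | 0 => res
  | fuel + 1 =>
    if (res.length : Int) < x then
      let term := 3 * n + 2
      let res' := if PySem.Int.mod term 4 ≠ 0 then res ++ [term] else res
      termsOfAPLoop fuel x res' (n + 1)
    else res

def termsOfAP (x : Int) : List Int := termsOfAPLoop (2 * x.toNat + 2) x [] 1

-- ===== PORT B =====
def termsOfAP_alt (x : Int) : List Int :=
  (PySem.List.pyRange 0 x 1).map fun i =>
    let b := PySem.Int.floordiv i 3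
    let r := PySem.Int.mod i 3
    let off : Int := if r = 0 then 1 else if r = 1 then 3 else 4
    3 * (4 * b + off) + 2

-- ===== PRECONDITION & SPEC =====
def Spec_termsOfAP (x : Int) (out : List Int) : Prop := out = termsOfAP_alt x
instance (x : Int) (out : List Int) : Decidable (Spec_termsOfAP x out) := by unfold Spec_termsOfAP; infer_instance

-- ===== CLAIM (what is proved, stated in full; the proofs are below) =====
def Claim_equal_termsOfAP : Prop := ∀ (x : Int), Dom_termsOfAP x → Spec_termsOfAP x (termsOfAP x)

-- ===== LEMMAS AND PROOFS =====

-- B's i-th term, as a function of a natural index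
def pvG (i : Nat) : Int :=
  3 * (4 * (i / 3 : Nat) + (if i % 3 = 0 then (1:Int) else if i % 3 = 1 then 3 else 4)) + 2

lemma pvAlt_eq (x : Int) : termsOfAP_alt x = (List.range x.toNat).map pvG := by
  unfold termsOfAP_alt
  rw [PySem.List.pyRange_one, List.map_map]
  simp only [Int.sub_zero]
  apply List.map_congr_left
  intro k _
  simp only [Function.comp, zero_add, pvG]
  have h1 : PySem.Int.floordiv (k : Int) 3 = ((k / 3 : Nat) : Int) := by
    simp only [PySem.Int.floordiv]
    rw [Int.fdiv_eq_ediv]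
    omega
  have h2 : PySem.Int.mod (k : Int) 3 = ((k % 3 : Nat) : Int) := by
    simp [PySem.Int.mod]
    have : (k : Int).fmod 3 = (k : Int) % 3 := by rw [Int.fmod_eq_emod]; simp
    omega
  rw [h1, h2]
  have h3 : k % 3 = 0 ∨ k % 3 = 1 ∨ k % 3 = 2 := by omega
  rcases h3 with h | h | h <;> simp [h]

-- loop invariant: entering with counter m ≥ 1, res holds m-1-(m+1)/4 already-kept terms
-- and enough fuel, the loop appends exactly the remaining terms of B's closed-form list
lemma pvLoop_eq (fuel : Nat) : ∀ (x : Int) (res : List Int) (n : Int) (m : Nat),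
    1 ≤ m → n = (m : Int) → res.length = m - 1 - (m + 1) / 4 →
    2 * (x - res.length).toNat + (if m % 4 = 2 then 1 else 0) ≤ fuel →
    termsOfAPLoop fuel x res n = res ++ ((List.range x.toNat).map pvG).drop res.length := by
  induction fuel with
  | zero =>
    intro x res n m hm hn hlen hfuel
    have hx : x ≤ (res.length : Int) := by split_ifs at hfuel <;> omega
    show res = res ++ ((List.range x.toNat).map pvG).drop res.length
    rw [List.drop_eq_nil_of_le (by simp; omega)]
    simp
  | succ fuel ihf =>
    intro x res n m hm hn hlen hfuel
    show (if (res.length : Int) < x then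
        termsOfAPLoop fuel x
          (if PySem.Int.mod (3 * n + 2) 4 ≠ 0 then res ++ [3 * n + 2] else res) (n + 1)
      else res) = _
    by_cases hc : (res.length : Int) < x
    · rw [if_pos hc]
      have hmod : PySem.Int.mod (3 * n + 2) 4 = ((3 * m + 2) % 4 : Nat) := by
        have : (3 * n + 2).fmod 4 = (3 * n + 2) % 4 := by rw [Int.fmod_eq_emod]; simp
        show (3 * n + 2).fmod 4 = _
        subst hn; omega
      by_cases hk : m % 4 = 2
      · -- skip step: term divisible by 4, res unchanged
        have hz : PySem.Int.mod (3 * n + 2) 4 = 0 := by rw [hmod]; norm_cast; omega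
        rw [if_neg (not_not_intro hz)]
        exact ihf x res (n + 1) (m + 1) (by omega) (by push_cast [hn]; ring) (by omega)
          (by split_ifs at hfuel ⊢ <;> omega)
      · -- keep step: append term = pvG res.length
        have hnz : PySem.Int.mod (3 * n + 2) 4 ≠ 0 := by rw [hmod]; norm_cast; omega
        rw [if_pos hnz]
        have hlt : res.length < x.toNat := by omega
        have hih := ihf x (res ++ [3 * n + 2]) (n + 1) (m + 1) (by omega)
          (by push_cast [hn]; ring)
          (by simp only [List.length_append, List.length_cons, List.length_nil]; omega)
          (by simp only [List.length_append, List.length_cons, List.length_nil]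
              split_ifs at hfuel ⊢ <;> omega)
        rw [hih]
        have hterm : (3 * n + 2) = pvG res.length := by
          simp only [pvG, hlen, hn]
          have h3 : (m - 1 - (m + 1) / 4) % 3 = 0 ∨ (m - 1 - (m + 1) / 4) % 3 = 1 ∨
              (m - 1 - (m + 1) / 4) % 3 = 2 := by omega
          rcases h3 with h' | h' | h' <;> simp only [h'] <;> norm_num <;> omega
        have hdrop : ((List.range x.toNat).map pvG).drop res.length
            = pvG res.length :: ((List.range x.toNat).map pvG).drop (res.length + 1) := by
          rw [List.drop_eq_getElem_cons (by simpa using hlt)]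
          simp
        rw [hdrop, hterm]
        simp
    · rw [if_neg hc]
      rw [List.drop_eq_nil_of_le (by simp; omega)]
      simp

-- ===== VERDICT (by name: the statement is the Claim_ definition above) =====
theorem termsOfAP_spec : Claim_equal_termsOfAP := by
  intro x _
  unfold Spec_termsOfAP termsOfAP
  have h := pvLoop_eq (2 * x.toNat + 2) x [] 1 1 le_rfl (by norm_num) (by simp)
    (by simp)
  rw [pvAlt_eq, h]
  simp
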